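-- pv_equiv track=rewrite | github.com/lenoirgn/MyBegginerWorkPython | sequences_indexation.py | suffixes
-- ===== SOURCE A (Python) =====
-- def suffixes(mot:str)->list[str]:
--     """ Renvoie la lsite de suffixes
--
--     Précondition :
--     Exemple(s) :
--     $$$ suffixes('fin')
--     ['', 'n', 'in', 'fin']
--     $$$ suffixes('')
--     []
--     $$$ suffixes('a')
--     ['','a']
--     """
--     temp_suffixe =''
--     lsuffixe=['']
--     if mot !='':
--        for suffixe in mot[::-1]:
--            temp_suffixe=suffixe+temp_suffixe
--            lsuffixe.append(temp_suffixe)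
--     else:
--         lsuffixe=[]
--     return lsuffixe
-- ===== SOURCE B (Python) =====
-- def suffixes(mot: str) -> list[str]:
--     """Liste des suffixes, du plus court au plus long; [] pour ''."""
--     if not mot:
--         return []
--     return [mot[i:] for i in range(len(mot), -1, -1)]
-- ===== Notes on version B (the rewrite author's own statement) =====
-- stated objective: simpler
-- what changed: Replaces the accumulate-and-prepend loop (rebuilding each suffix from the previous one via a running temp string) with a direct comprehension that slices each suffix independently from the source by a descending index.
import Mathlib
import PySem

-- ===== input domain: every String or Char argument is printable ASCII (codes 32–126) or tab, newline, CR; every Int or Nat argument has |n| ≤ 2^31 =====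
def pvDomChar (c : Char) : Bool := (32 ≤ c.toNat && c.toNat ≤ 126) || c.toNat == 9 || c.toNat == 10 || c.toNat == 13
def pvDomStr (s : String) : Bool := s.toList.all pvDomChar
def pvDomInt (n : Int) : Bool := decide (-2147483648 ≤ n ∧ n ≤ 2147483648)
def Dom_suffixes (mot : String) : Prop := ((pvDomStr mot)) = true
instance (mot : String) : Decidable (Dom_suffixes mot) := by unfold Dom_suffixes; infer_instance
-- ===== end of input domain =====

-- B replaces A's accumulate-and-prepend loop by a comprehension of independent slices (simpler decomposition, same cost).


-- ===== PORT A =====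
-- temp_suffixe='' ; lsuffixe=[''] ; for suffixe in mot[::-1]: temp=suffixe+temp; lsuffixe.append(temp)
def suffixes (mot : String) : List String :=
  let init : List Char × List String := ([], [""])
  if mot ≠ "" then
    let rev : String := (PySem.Str.slice? mot none none (-1)).getD ""   -- mot[::-1]
    (rev.toList.foldl
      (fun st c =>
        let temp := c :: st.1                 -- temp_suffixe = suffixe + temp_suffixe
        (temp, st.2 ++ [String.ofList temp])  -- lsuffixe.append(temp_suffixe)
      ) init).2
  else []

-- ===== PORT B =====
-- if not mot: return [] ; return [mot[i:] for i in range(len(mot), -1, -1)]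
def suffixes_alt (mot : String) : List String :=
  if mot = "" then []
  else (PySem.List.pyRange (mot.toList.length : Int) (-1) (-1)).map
         (fun i => PySem.Str.slice mot (some i) none)

-- ===== PRECONDITION & SPEC =====
def Spec_suffixes (mot : String) (out : List String) : Prop := out = suffixes_alt mot
instance (mot : String) (out : List String) : Decidable (Spec_suffixes mot out) := by unfold Spec_suffixes; infer_instance

-- ===== CLAIM (what is proved, stated in full; the proofs are below) =====
def Claim_equal_suffixes : Prop := ∀ (mot : String), Dom_suffixes mot → Spec_suffixes mot (suffixes mot)

-- ===== LEMMAS AND PROOFS =====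

-- A's loop invariant: folding the characters of r onto (temp, acc) appends, for each
-- prefix of r of length k+1, the string (that prefix reversed) ++ temp.
lemma suffixes_fold (r temp : List Char) (acc : List String) :
    (r.foldl (fun (st : List Char × List String) c =>
        let t := c :: st.1
        (t, st.2 ++ [String.ofList t])) (temp, acc)).2
    = acc ++ (List.range r.length).map
        (fun k => String.ofList ((r.take (k+1)).reverse ++ temp)) := by
  induction r generalizing temp acc with
  | nil => simp
  | cons c r ih =>
    simp only [List.foldl_cons]
    rw [ih]
    rw [List.length_cons, List.range_succ_eq_map]
    simp [List.append_assoc]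

lemma suffixes_eq_drops (mot : String) (h : mot ≠ "") :
    suffixes mot
    = (List.range (mot.toList.length + 1)).map
        (fun j => String.ofList (mot.toList.drop (mot.toList.length - j))) := by
  unfold suffixes
  rw [if_pos h]
  simp only [PySem.Str.slice?_none_none_neg_one, Option.getD_some]
  have htl : (String.ofList mot.toList.reverse).toList = mot.toList.reverse := by
    simp
  rw [htl, suffixes_fold]
  set l := mot.toList with hl
  rw [List.range_succ_eq_map, List.map_cons, List.map_map]
  simp only [List.length_reverse, List.append_nil, List.singleton_append,
    Nat.sub_zero, List.drop_length]
  congr 1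
  apply List.map_congr_left
  intro k hk
  simp only [List.mem_range] at hk
  simp only [Function.comp_apply]
  congr 1
  rw [List.reverse_take, List.reverse_reverse, List.length_reverse]

lemma suffixes_alt_eq_drops (mot : String) (h : mot ≠ "") :
    suffixes_alt mot
    = (List.range (mot.toList.length + 1)).map
        (fun j => String.ofList (mot.toList.drop (mot.toList.length - j))) := by
  unfold suffixes_alt
  rw [if_neg h]
  rw [PySem.List.pyRange_neg_one]
  have hn : ((mot.toList.length : Int) - (-1)).toNat = mot.toList.length + 1 := by omega
  rw [hn, List.map_map]
  apply List.map_congr_left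
  intro j hj
  have hj' : j ≤ mot.toList.length := by
    simp only [List.mem_range] at hj; omega
  simp only [Function.comp]
  have : ((mot.toList.length : Int) - (j : Int)) = ((mot.toList.length - j : Nat) : Int) := by
    omega
  rw [this]
  have hts : (PySem.Str.slice mot (some ((mot.toList.length - j : Nat) : Int)) none).toList
      = mot.toList.drop (mot.toList.length - j) := by
    simp [PySem.Str.toList_slice, PySem.List.slice_from_natCast]
  rw [← hts, String.ofList_toList]

-- ===== VERDICT (by name: the statement is the Claim_ definition above) =====
theorem suffixes_spec : Claim_equal_suffixes := by
  intro mot _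
  unfold Spec_suffixes
  by_cases h : mot = ""
  · subst h; decide
  · rw [suffixes_eq_drops mot h, suffixes_alt_eq_drops mot h]
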